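-- pv_equiv track=rewrite | github.com/dorberens/Boggle | ex12_utils.py | make_board_dict
-- ===== SOURCE A (Python) =====
-- def make_board_dict(board):
--     """
--     This function creates a dictionary from board values,
--     such that the keys are the letters on the board, and the values are their coordinates.
--     :param board: list of lists
--     :return: dictionary
--     """
--     letters = set()
--     board_dict = {}
--     for r, row in enumerate(board):
--         for c, val in enumerate(row):
--             if val in board_dict:
--                 board_dict[val].append((r, c))
--             else:
--                 board_dict[val] = [(r, c)]
--                 if len(val) == 1:
--                     letters.add(val)
--                 else:
--                     letters.add(val[0])
--                     letters.add(val[1])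
--     return board_dict, letters
-- ===== SOURCE B (Python) =====
-- def make_board_dict(board):
--     cells = [(val, (r, c)) for r, row in enumerate(board) for c, val in enumerate(row)]
--     order = list(dict.fromkeys(val for val, _ in cells))
--     board_dict = {val: [pos for v, pos in cells if v == val] for val in order}
--     letters = {ch for val in order
--                for ch in (val if len(val) == 1 else val[0] + val[1])}
--     return board_dict, letters
-- ===== Notes on version B (the rewrite author's own statement) =====
-- stated objective: alternative
-- what changed: B replaces A's incremental single pass (dict/letters updated cell by cell with a first-encounter branch) by a flatten/dedup/group-by pipeline: flatten the board into a (val,(r,c)) cell list, take distinct values in first-occurrence order via dict.fromkeys, build the coordinate map by filtering the cell list per distinct value, and the letters set by one comprehension over the distinct values.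
import Mathlib
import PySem

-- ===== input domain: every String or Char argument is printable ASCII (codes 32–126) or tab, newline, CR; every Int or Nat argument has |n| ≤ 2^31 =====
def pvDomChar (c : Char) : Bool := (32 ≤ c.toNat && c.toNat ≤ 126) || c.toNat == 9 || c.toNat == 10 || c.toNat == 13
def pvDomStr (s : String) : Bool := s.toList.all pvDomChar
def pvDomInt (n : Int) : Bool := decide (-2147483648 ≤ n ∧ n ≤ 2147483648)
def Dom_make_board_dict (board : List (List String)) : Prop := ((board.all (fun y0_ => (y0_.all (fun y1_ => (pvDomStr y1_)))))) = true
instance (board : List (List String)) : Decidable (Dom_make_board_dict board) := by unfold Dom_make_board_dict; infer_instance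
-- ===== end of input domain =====

-- B replaces A's incremental single pass (first-encounter branch updating dict and letters
-- while scanning cells) by a flatten / dedup / group-by-filter pipeline: flatten the board to a
-- (val, (r, c)) cell list, take the distinct values in first-occurrence order, and build the
-- coordinate map by filtering the cell list per distinct value (objective: alternative).

-- ===== PORT A =====
-- val[i] as a one-character string; none = IndexError, unreachable under Pre_ (no empty cell).
def mbdChar (val : String) (i : Int) : String :=
  match PySem.Str.pyGet? val i with
  | some ch => String.ofList [ch]
  | none => ""

-- A's letters update at a first encounter: if len(val)==1 add val else add val[0], val[1]
def mbdAddLetters (letters : PySem.Set String) (val : String) : PySem.Set String :=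
  if PySem.Str.len val = 1 then letters.add val
  else (letters.add (mbdChar val 0)).add (mbdChar val 1)

def make_board_dict (board : List (List String)) :
    (List (String × List (Int × Int))) × List String :=
  let st := (PySem.List.enumerate board 0).foldl
    (fun st rrow =>
      (PySem.List.enumerate rrow.2 0).foldl
        (fun st cv =>
          if st.2.contains cv.2 then
            (st.1, st.2.modify cv.2 [] (· ++ [(rrow.1, cv.1)]))
          else
            (mbdAddLetters st.1 cv.2, st.2.insert cv.2 [(rrow.1, cv.1)]))
        st)
    ((PySem.Set.empty : PySem.Set String),
     (PySem.Dict.empty : PySem.Dict String (List (Int × Int))))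
  (st.2.items, st.1)

-- ===== PORT B =====
-- the characters B's set comprehension iterates for one distinct value:
-- val itself when len(val)==1, else val[0] + val[1] (empty on the IndexError inputs Pre_ excludes)
def mbdChars (val : String) : List Char :=
  if PySem.Str.len val = 1 then val.toList
  else
    match PySem.Str.pyGet? val 0, PySem.Str.pyGet? val 1 with
    | some a, some b => [a, b]
    | _, _ => []

-- 'for ch in …: letters.add(ch)' for one distinct value (each ch a 1-char string)
def mbdAddChars (letters : PySem.Set String) (val : String) : PySem.Set String :=
  (mbdChars val).foldl (fun s ch => PySem.Set.add s (String.ofList [ch])) letters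

def make_board_dict_alt (board : List (List String)) :
    (List (String × List (Int × Int))) × List String :=
  -- cells = [(val, (r, c)) for r, row in enumerate(board) for c, val in enumerate(row)]
  let cells := (PySem.List.enumerate board 0).flatMap
    (fun rrow => (PySem.List.enumerate rrow.2 0).map (fun cv => (cv.2, (rrow.1, cv.1))))
  -- order = list(dict.fromkeys(val for val, _ in cells))
  let order := PySem.List.dedup (cells.map (·.1))
  -- board_dict = {val: [pos for v, pos in cells if v == val] for val in order}
  let board_dict := order.map
    (fun val => (val, (cells.filter (fun cell => cell.1 == val)).map (·.2)))
  -- letters = {ch for val in order for ch in (val if len(val) == 1 else val[0] + val[1])}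
  let letters := order.foldl mbdAddChars (PySem.Set.empty : PySem.Set String)
  (board_dict, letters)

-- ===== PRECONDITION & SPEC =====
-- Pre_ excludes boards containing an empty-string cell: there Python A (and B) raises
-- IndexError on val[0].
def Pre_make_board_dict (board : List (List String)) : Prop :=
  ∀ row ∈ board, ∀ v ∈ row, v ≠ ""
instance (board : List (List String)) : Decidable (Pre_make_board_dict board) := by
  unfold Pre_make_board_dict; infer_instance

def pvWitness_make_board_dict : List (List String) := [["a", "bc"], ["a", "a"]]

def Spec_make_board_dict (board : List (List String))
    (out : (List (String × List (Int × Int))) × List String) : Prop :=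
  out = make_board_dict_alt board
instance (board : List (List String)) (out : (List (String × List (Int × Int))) × List String) :
    Decidable (Spec_make_board_dict board out) := by unfold Spec_make_board_dict; infer_instance

-- ===== CLAIM (what is proved, stated in full; the proofs are below) =====
def Claim_equal_make_board_dict : Prop :=
  ∀ (board : List (List String)), Dom_make_board_dict board → Pre_make_board_dict board →
    Spec_make_board_dict board (make_board_dict board)

-- ===== LEMMAS AND PROOFS =====

-- the flattened row-major cell list (val, (r, c)) both proofs reason over
def mbdCells (board : List (List String)) : List (String × (Int × Int)) :=
  (PySem.List.enumerate board 0).flatMap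
    (fun rrow => (PySem.List.enumerate rrow.2 0).map (fun cv => (cv.2, (rrow.1, cv.1))))

def mbdStepA (st : PySem.Set String × PySem.Dict String (List (Int × Int)))
    (p : String × (Int × Int)) : PySem.Set String × PySem.Dict String (List (Int × Int)) :=
  if st.2.contains p.1 then (st.1, st.2.modify p.1 [] (· ++ [p.2]))
  else (mbdAddLetters st.1 p.1, st.2.insert p.1 [p.2])

def mbdStepD (d : PySem.Dict String (List (Int × Int))) (p : String × (Int × Int)) :
    PySem.Dict String (List (Int × Int)) :=
  d.insert p.1 (d.getD p.1 [] ++ [p.2])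

def mbdL (keys : List String) : PySem.Set String := keys.foldl mbdAddChars PySem.Set.empty

lemma mbd_foldA (board : List (List String))
    (st : PySem.Set String × PySem.Dict String (List (Int × Int))) :
    (PySem.List.enumerate board 0).foldl
      (fun st rrow =>
        (PySem.List.enumerate rrow.2 0).foldl
          (fun st cv =>
            if st.2.contains cv.2 then
              (st.1, st.2.modify cv.2 [] (· ++ [(rrow.1, cv.1)]))
            else
              (mbdAddLetters st.1 cv.2, st.2.insert cv.2 [(rrow.1, cv.1)]))
          st)
      st
    = (mbdCells board).foldl mbdStepA st := by
  simp [mbdCells, List.foldl_flatMap, List.foldl_map, mbdStepA]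

-- A's and B's per-value letters updates agree on every non-empty value
lemma mbd_addEq (letters : PySem.Set String) (val : String) (hne : val ≠ "") :
    mbdAddLetters letters val = mbdAddChars letters val := by
  by_cases h1 : PySem.Str.len val = 1
  · have h1' : val.toList.length = 1 := by
      have := h1; simp only [PySem.Str.len] at this; exact_mod_cast this
    obtain ⟨c, hc⟩ : ∃ c, val.toList = [c] := List.length_eq_one_iff.mp h1'
    have hv : String.ofList [c] = val := String.ofList_eq.mpr hc.symm
    simp only [mbdAddLetters, mbdAddChars, mbdChars, if_pos h1, hc,
      List.foldl_cons, List.foldl_nil, hv]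
  · have h0 : val.toList ≠ [] := by
      intro h
      exact hne (String.ofList_eq.mpr h.symm ▸ rfl)
    have hlen : 2 ≤ val.toList.length := by
      simp only [PySem.Str.len] at h1
      have := List.length_pos_iff.mpr h0
      omega
    have hg0 : PySem.Str.pyGet? val 0 = some val.toList[0] := by
      have := PySem.List.pyGet?_natCast (xs := val.toList) (n := 0)
      simp only [PySem.Str.pyGet?, PySem.Chars.pyGet?]
      rw [show (0:Int) = ((0:Nat):Int) by norm_num, this]
      exact List.getElem?_eq_getElem (by omega)
    have hg1 : PySem.Str.pyGet? val 1 = some val.toList[1] := by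
      have := PySem.List.pyGet?_natCast (xs := val.toList) (n := 1)
      simp only [PySem.Str.pyGet?, PySem.Chars.pyGet?]
      rw [show (1:Int) = ((1:Nat):Int) by norm_num, this]
      exact List.getElem?_eq_getElem (by omega)
    simp only [mbdAddLetters, mbdAddChars, mbdChars, mbdChar, if_neg h1, hg0, hg1,
      List.foldl_cons, List.foldl_nil]

-- loop invariant: A's letters set is mbdL of the dict's keys, the dict evolves by mbdStepD
lemma mbd_main (cells : List (String × (Int × Int))) (hne : ∀ p ∈ cells, p.1 ≠ "")
    (d : PySem.Dict String (List (Int × Int))) (hnd : d.keys.Nodup) :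
    cells.foldl mbdStepA (mbdL d.keys, d)
      = (mbdL (cells.foldl mbdStepD d).keys, cells.foldl mbdStepD d) := by
  induction cells generalizing d with
  | nil => rfl
  | cons p cells ih =>
    have hp : p.1 ≠ "" := hne p (List.mem_cons_self)
    have hne' : ∀ q ∈ cells, q.1 ≠ "" := fun q hq => hne q (List.mem_cons_of_mem _ hq)
    simp only [List.foldl_cons]
    by_cases h : d.contains p.1 = true
    · have hstep : mbdStepA (mbdL d.keys, d) p = (mbdL (mbdStepD d p).keys, mbdStepD d p) := by
        simp only [mbdStepA, mbdStepD, h, if_pos, PySem.Dict.modify]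
        rw [PySem.Dict.keys_insert_of_contains d _ h]
      rw [hstep, ih hne' (mbdStepD d p) (PySem.Dict.nodup_keys_insert d _ _ hnd)]
    · have h' : d.contains p.1 = false := by simpa using h
      have hstep : mbdStepA (mbdL d.keys, d) p = (mbdL (mbdStepD d p).keys, mbdStepD d p) := by
        simp only [mbdStepA, mbdStepD, h', if_neg, Bool.false_eq_true, not_false_iff]
        rw [PySem.Dict.getD_of_not_contains d [] h',
            PySem.Dict.keys_insert_of_not_contains d _ h']
        simp [mbdL, List.foldl_append, mbd_addEq _ _ hp]
      rw [hstep, ih hne' (mbdStepD d p) (PySem.Dict.nodup_keys_insert d _ _ hnd)]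

-- every cell value of the flattened list is a board entry, hence non-empty under Pre_
lemma mbd_cells_ne (board : List (List String)) (hpre : Pre_make_board_dict board) :
    ∀ p ∈ mbdCells board, p.1 ≠ "" := by
  intro p hp
  simp only [mbdCells, List.mem_flatMap, List.mem_map] at hp
  obtain ⟨rrow, hrrow, cv, hcv, hpe⟩ := hp
  obtain ⟨j, hj, hje⟩ := (PySem.List.mem_enumerate_iff _ _ _).mp hrrow
  obtain ⟨k, hk, hke⟩ := (PySem.List.mem_enumerate_iff _ _ _).mp hcv
  have hrow : rrow.2 ∈ board := by rw [hje]; exact List.getElem_mem hj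
  have hval : cv.2 ∈ rrow.2 := by rw [hke]; exact List.getElem_mem hk
  have := hpre rrow.2 hrow cv.2 hval
  subst hpe
  exact this

-- B's result, written over mbdCells (definitional: the port's lets are exactly these terms)
lemma mbd_altEq (board : List (List String)) :
    make_board_dict_alt board
      = ((PySem.List.dedup ((mbdCells board).map (·.1))).map
           (fun val => (val, ((mbdCells board).filter (fun cell => cell.1 == val)).map (·.2))),
         (PySem.List.dedup ((mbdCells board).map (·.1))).foldl mbdAddChars
           (PySem.Set.empty : PySem.Set String)) := rfl

-- ===== VERDICT (by name: the statement is the Claim_ definition above) =====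
theorem make_board_dict_spec : Claim_equal_make_board_dict := by
  intro board _ hpre
  unfold Spec_make_board_dict
  unfold make_board_dict
  rw [mbd_foldA, mbd_altEq]
  have h0 : ((PySem.Set.empty : PySem.Set String),
      (PySem.Dict.empty : PySem.Dict String (List (Int × Int))))
      = (mbdL (PySem.Dict.empty : PySem.Dict String (List (Int × Int))).keys,
         (PySem.Dict.empty : PySem.Dict String (List (Int × Int)))) := rfl
  rw [h0, mbd_main _ (mbd_cells_ne board hpre) _ PySem.Dict.nodup_keys_empty]
  set D := (mbdCells board).foldl mbdStepD (PySem.Dict.empty : PySem.Dict String (List (Int × Int))) with hD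
  have hK : D.keys = PySem.List.dedup ((mbdCells board).map (·.1)) := by
    rw [hD]
    unfold mbdStepD
    rw [PySem.Dict.keys_foldl_insert_key (mbdCells board) (·.1)
      (fun d p => d.getD p.1 [] ++ [p.2]) PySem.Dict.empty]
    rfl
  have hNd : D.keys.Nodup := by
    rw [hD]
    unfold mbdStepD
    exact PySem.Dict.nodup_keys_foldl_insert_key (mbdCells board) (·.1)
      (fun d p => d.getD p.1 [] ++ [p.2]) PySem.Dict.empty PySem.Dict.nodup_keys_empty
  have hGet : ∀ k, D.getD k [] = ((mbdCells board).filter (fun cell => cell.1 == k)).map (·.2) := by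
    intro k
    have : D = (mbdCells board).foldl
        (fun d p => d.modify p.1 [] (· ++ [p.2]))
        (PySem.Dict.empty : PySem.Dict String (List (Int × Int))) := rfl
    rw [this, PySem.Dict.getD_foldl_modify_append]
    simp
  have hItems : D.items
      = (PySem.List.dedup ((mbdCells board).map (·.1))).map
          (fun val => (val, ((mbdCells board).filter (fun cell => cell.1 == val)).map (·.2))) := by
    rw [PySem.Dict.items_eq_map_keys D hNd [], hK]
    exact List.map_congr_left (fun k _ => by rw [hGet k])
  rw [Prod.mk.injEq]
  exact ⟨hItems, by rw [mbdL, hK]⟩
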